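-- pv_equiv track=rewrite | github.com/MahanyaKochhar/LeetCode-Profile | my-folder/4143-number-of-alternating-xor-partitions/solution.py | alternatingXOR
-- ===== SOURCE A (Python) =====
-- from typing import List
--
-- def alternatingXOR(nums: List[int], target1: int, target2: int) -> int:
--     mod = 10**9 + 7
--     dp1 = [0 for i in range(len(nums) + 1)]
--     dp2 = [0 for i in range(len(nums) + 1)]
--     mp1 = {}
--     mp2 = {}
--     mp2[0] = 1
--     pre = 0
--     for i in range(1,len(nums) + 1):
--         pre = pre ^ nums[i - 1]
--         dp1[i] = mp2.get(pre ^ target1,0)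
--         dp2[i] = mp1.get(pre ^ target2,0)
--         mp1[pre] = (mp1.get(pre,0) +  dp1[i]) % mod
--         mp2[pre] = (mp2.get(pre,0) + dp2[i]) % mod
--
--     return ((dp1[len(nums)] + dp2[len(nums)]) % mod)
-- ===== SOURCE B (Python) =====
-- def alternatingXOR(nums, target1, target2):
--     # Naive O(n^2) DP over partition boundaries: seen[j-1] = (prefix-xor up to j,
--     # count of partitions of nums[:j] ending in a target1 segment, same for target2).
--     mod = 10**9 + 7
--     cur = 0
--     a1 = a2 = 0
--     seen = []
--     for x in nums:
--         cur ^= x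
--         k1 = cur ^ target1
--         k2 = cur ^ target2
--         s1 = 1 if k1 == 0 else 0  # boundary 0 (empty prefix) starts a target1 segment
--         s2 = 0
--         for q, u, v in seen:
--             if q == k1:
--                 s1 += v
--             if q == k2:
--                 s2 += u
--         a1 = s1 % mod
--         a2 = s2 % mod
--         seen.append((cur, a1, a2))
--     return (a1 + a2) % mod
-- ===== Notes on version B (the rewrite author's own statement) =====
-- stated objective: alternative
-- what changed: Replaces A's O(n) prefix-xor hash-map accumulation (two dicts of mod-reduced partial counts plus dp arrays) by the naive O(n^2) DP: a single pass that, for each position, rescans the recorded list of earlier boundaries (prefix-xor, dp1, dp2) and sums the matching weights directly, with the mp2[0]=1 seed kept as a separate base weight for boundary 0.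
import Mathlib
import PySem

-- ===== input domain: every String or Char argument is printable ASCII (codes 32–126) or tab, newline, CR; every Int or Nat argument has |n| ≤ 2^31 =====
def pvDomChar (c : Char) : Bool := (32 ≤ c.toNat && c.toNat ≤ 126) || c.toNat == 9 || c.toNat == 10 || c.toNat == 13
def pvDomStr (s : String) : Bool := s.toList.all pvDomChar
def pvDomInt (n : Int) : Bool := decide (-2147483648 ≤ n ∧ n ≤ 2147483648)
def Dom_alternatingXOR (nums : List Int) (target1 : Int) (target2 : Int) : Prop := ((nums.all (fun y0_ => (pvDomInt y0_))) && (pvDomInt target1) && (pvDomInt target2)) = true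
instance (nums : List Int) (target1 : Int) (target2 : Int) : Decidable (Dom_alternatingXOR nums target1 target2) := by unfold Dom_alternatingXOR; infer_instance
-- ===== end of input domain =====

-- B replaces A's prefix-xor hash-map accumulation by the naive O(n^2) boundary-rescan DP (objective: alternative).

-- ===== PORT A =====
-- loop body of A's 'for i in range(1, len(nums)+1)': state is (dp1, dp2, mp1, mp2, pre)
def aStep (nums : List Int) (target1 : Int) (target2 : Int)
    (st : List Int × List Int × PySem.Dict Int Int × PySem.Dict Int Int × Int) (i : Int) :
    List Int × List Int × PySem.Dict Int Int × PySem.Dict Int Int × Int :=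
  let m : Int := 1000000007
  let pre' := PySem.Int.bxor st.2.2.2.2 (PySem.List.pyGetD nums (i - 1) 0)  -- nums[i-1], index always in range
  let v1 := st.2.2.2.1.getD (PySem.Int.bxor pre' target1) 0
  let v2 := st.2.2.1.getD (PySem.Int.bxor pre' target2) 0
  (st.1.set i.toNat v1, st.2.1.set i.toNat v2,
   st.2.2.1.insert pre' (PySem.Int.mod (st.2.2.1.getD pre' 0 + v1) m),
   st.2.2.2.1.insert pre' (PySem.Int.mod (st.2.2.2.1.getD pre' 0 + v2) m),
   pre')

def alternatingXOR (nums : List Int) (target1 : Int) (target2 : Int) : Int :=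
  let m : Int := 1000000007
  let n := nums.length
  let st := (PySem.List.pyRange 1 ((n : Int) + 1) 1).foldl (aStep nums target1 target2)
      (List.replicate (n + 1) 0, List.replicate (n + 1) 0,
       PySem.Dict.empty, (PySem.Dict.empty : PySem.Dict Int Int).insert 0 1, 0)
  PySem.Int.mod (PySem.List.pyGetD st.1 (n : Int) 0 + PySem.List.pyGetD st.2.1 (n : Int) 0) m

-- ===== PORT B =====
-- loop body of B's 'for x in nums': state is (cur, a1, a2, seen)
def bStep (target1 : Int) (target2 : Int)
    (st : Int × Int × Int × List (Int × Int × Int)) (x : Int) :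
    Int × Int × Int × List (Int × Int × Int) :=
  let m : Int := 1000000007
  let cur' := PySem.Int.bxor st.1 x
  let k1 := PySem.Int.bxor cur' target1
  let k2 := PySem.Int.bxor cur' target2
  let s : Int × Int := st.2.2.2.foldl
    (fun (s : Int × Int) (t : Int × Int × Int) =>
      (if t.1 = k1 then s.1 + t.2.2 else s.1,
       if t.1 = k2 then s.2 + t.2.1 else s.2))
    ((if k1 = 0 then 1 else 0), 0)
  let a1 := PySem.Int.mod s.1 m
  let a2 := PySem.Int.mod s.2 m
  (cur', a1, a2, st.2.2.2 ++ [(cur', a1, a2)])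

def alternatingXOR_alt (nums : List Int) (target1 : Int) (target2 : Int) : Int :=
  let m : Int := 1000000007
  let st := nums.foldl (bStep target1 target2) (0, 0, 0, ([] : List (Int × Int × Int)))
  PySem.Int.mod (st.2.1 + st.2.2.1) m

-- ===== PRECONDITION & SPEC =====
def Spec_alternatingXOR (nums : List Int) (target1 : Int) (target2 : Int) (out : Int) : Prop := out = alternatingXOR_alt nums target1 target2
instance (nums : List Int) (target1 : Int) (target2 : Int) (out : Int) : Decidable (Spec_alternatingXOR nums target1 target2 out) := by unfold Spec_alternatingXOR; infer_instance

-- ===== CLAIM (what is proved, stated in full; the proofs are below) =====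
def Claim_equal_alternatingXOR : Prop := ∀ (nums : List Int) (target1 : Int) (target2 : Int), Dom_alternatingXOR nums target1 target2 → Spec_alternatingXOR nums target1 target2 (alternatingXOR nums target1 target2)

-- ===== LEMMAS AND PROOFS =====

-- A's final loop state / B's final loop state
def AFold (nums : List Int) (target1 : Int) (target2 : Int) :
    List Int × List Int × PySem.Dict Int Int × PySem.Dict Int Int × Int :=
  (PySem.List.pyRange 1 ((nums.length : Int) + 1) 1).foldl (aStep nums target1 target2)
    (List.replicate (nums.length + 1) 0, List.replicate (nums.length + 1) 0,
     PySem.Dict.empty, (PySem.Dict.empty : PySem.Dict Int Int).insert 0 1, 0)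

def BFold (nums : List Int) (target1 : Int) (target2 : Int) :
    Int × Int × Int × List (Int × Int × Int) :=
  nums.foldl (bStep target1 target2) (0, 0, 0, ([] : List (Int × Int × Int)))

-- the two weighted boundary sums over B's 'seen' list
def sum1 (seen : List (Int × Int × Int)) (p : Int) : Int :=
  (seen.map (fun t => if t.1 = p then t.2.1 else 0)).sum
def sum2 (seen : List (Int × Int × Int)) (p : Int) : Int :=
  (seen.map (fun t => if t.1 = p then t.2.2 else 0)).sum

lemma sum1_append (s : List (Int × Int × Int)) (t : Int × Int × Int) (p : Int) :
    sum1 (s ++ [t]) p = sum1 s p + (if t.1 = p then t.2.1 else 0) := by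
  simp [sum1]
lemma sum2_append (s : List (Int × Int × Int)) (t : Int × Int × Int) (p : Int) :
    sum2 (s ++ [t]) p = sum2 s p + (if t.1 = p then t.2.2 else 0) := by
  simp [sum2]

-- the full state relation after running both loops on the same input
def StateRel (nums : List Int) (target1 : Int) (target2 : Int) : Prop :=
  AFold nums target1 target2 |> fun A =>
  BFold nums target1 target2 |> fun B =>
  A.2.2.2.2 = B.1
  ∧ B.2.2.2.length = nums.length
  ∧ A.1.length = nums.length + 1
  ∧ A.2.1.length = nums.length + 1
  ∧ PySem.List.pyGetD A.1 (nums.length : Int) 0 = B.2.1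
  ∧ PySem.List.pyGetD A.2.1 (nums.length : Int) 0 = B.2.2.1
  ∧ (∀ p : Int, A.2.2.1.getD p 0 = PySem.Int.mod (sum1 B.2.2.2 p) 1000000007)
  ∧ (∀ p : Int, A.2.2.2.1.getD p 0 =
      PySem.Int.mod ((if p = 0 then 1 else 0) + sum2 B.2.2.2 p) 1000000007)

lemma set_append_left (l : List Int) (x : Int) (k : Nat) (v : Int) (h : k < l.length) :
    (l ++ [x]).set k v = l.set k v ++ [x] := by
  induction l generalizing k with
  | nil => simp at h
  | cons a t ih =>
    cases k with
    | zero => simp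
    | succ k => simp only [List.cons_append, List.set_cons_succ]
                rw [ih k (by simpa using h)]

lemma pyGetD_append_left (l : List Int) (x : Int) (j : Int) (h0 : 0 ≤ j)
    (h : j < (l.length : Int)) :
    PySem.List.pyGetD (l ++ [x]) j 0 = PySem.List.pyGetD l j 0 := by
  have hj : j.toNat < l.length := by omega
  have h1 : j ≤ (l.length : Int) := by omega
  simp [PySem.List.pyGetD, PySem.List.pyGet?, PySem.List.pyIdx?, h0, h, h1]

lemma pyGetD_concat_length (l : List Int) (x : Int) :
    PySem.List.pyGetD (l ++ [x]) (l.length : Int) 0 = x := by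
  simp [PySem.List.pyGetD, PySem.List.pyGet?, PySem.List.pyIdx?]

lemma pyGetD_set_self (l : List Int) (k : Nat) (v : Int) (h : k < l.length) :
    PySem.List.pyGetD (l.set k v) (k : Int) 0 = v := by
  simp [PySem.List.pyGetD, PySem.List.pyGet?, PySem.List.pyIdx?, h]

-- one padded step of A: appending a trailing 0 to both dp arrays commutes with aStep
lemma aStep_pad (nums : List Int) (x : Int) (t1 t2 : Int)
    (st : List Int × List Int × PySem.Dict Int Int × PySem.Dict Int Int × Int) (i : Int)
    (h1 : 1 ≤ i) (h2 : i ≤ (nums.length : Int))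
    (hl1 : st.1.length = nums.length + 1) (hl2 : st.2.1.length = nums.length + 1) :
    aStep (nums ++ [x]) t1 t2 (st.1 ++ [0], st.2.1 ++ [0], st.2.2) i
      = ((aStep nums t1 t2 st i).1 ++ [0], (aStep nums t1 t2 st i).2.1 ++ [0],
         (aStep nums t1 t2 st i).2.2) := by
  have hget : PySem.List.pyGetD (nums ++ [x]) (i - 1) 0 = PySem.List.pyGetD nums (i - 1) 0 :=
    pyGetD_append_left nums x (i - 1) (by omega) (by omega)
  have hset1 : i.toNat < st.1.length := by omega
  have hset2 : i.toNat < st.2.1.length := by omega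
  simp only [aStep, hget, set_append_left _ _ _ _ hset1, set_append_left _ _ _ _ hset2]

lemma afold_pad (nums : List Int) (x : Int) (t1 t2 : Int) :
    ∀ (L : List Int) (st : List Int × List Int × PySem.Dict Int Int × PySem.Dict Int Int × Int),
      (∀ i ∈ L, 1 ≤ i ∧ i ≤ (nums.length : Int)) →
      st.1.length = nums.length + 1 → st.2.1.length = nums.length + 1 →
      L.foldl (aStep (nums ++ [x]) t1 t2) (st.1 ++ [0], st.2.1 ++ [0], st.2.2)
        = ((L.foldl (aStep nums t1 t2) st).1 ++ [0],
           (L.foldl (aStep nums t1 t2) st).2.1 ++ [0],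
           (L.foldl (aStep nums t1 t2) st).2.2) := by
  intro L
  induction L with
  | nil => intro st _ _ _; simp
  | cons i L ih =>
    intro st hmem hl1 hl2
    have hi := hmem i (by simp)
    simp only [List.foldl_cons]
    rw [aStep_pad nums x t1 t2 st i hi.1 hi.2 hl1 hl2]
    exact ih _ (fun j hj => hmem j (by simp [hj])) (by simp [aStep, hl1]) (by simp [aStep, hl2])

-- split the paired inner fold of B into the two boundary sums
lemma binner_eq (k1 k2 : Int) (seen : List (Int × Int × Int)) : ∀ (c1 c2 : Int),
    seen.foldl
      (fun (s : Int × Int) (t : Int × Int × Int) =>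
        (if t.1 = k1 then s.1 + t.2.2 else s.1,
         if t.1 = k2 then s.2 + t.2.1 else s.2)) (c1, c2)
      = (c1 + sum2 seen k1, c2 + sum1 seen k2) := by
  induction seen with
  | nil => intro c1 c2; simp [sum1, sum2]
  | cons t rest ih =>
    intro c1 c2
    simp only [List.foldl_cons, ih]
    simp only [sum1, sum2, List.map_cons, List.sum_cons, Prod.mk.injEq]
    constructor <;> split <;> ring

lemma mod_add_mod_left (a b : Int) :
    PySem.Int.mod (PySem.Int.mod a 1000000007 + b) 1000000007
      = PySem.Int.mod (a + b) 1000000007 := by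
  have hp : (0:Int) < 1000000007 := by norm_num
  simp only [PySem.Int.mod_eq_emod_of_pos hp]
  exact Int.emod_add_emod _ _ _

lemma bfold_append (nums : List Int) (x : Int) (t1 t2 : Int) :
    BFold (nums ++ [x]) t1 t2 = bStep t1 t2 (BFold nums t1 t2) x := by
  simp [BFold, List.foldl_append]

lemma afold_append (nums : List Int) (x : Int) (t1 t2 : Int) :
    AFold (nums ++ [x]) t1 t2
      = aStep (nums ++ [x]) t1 t2
          ((AFold nums t1 t2).1 ++ [0], (AFold nums t1 t2).2.1 ++ [0],
           (AFold nums t1 t2).2.2) ((nums.length : Int) + 1) := by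
  unfold AFold
  have hN : (nums ++ [x]).length = nums.length + 1 := by simp
  rw [hN, show ((nums.length + 1 : Nat) : Int) = (nums.length : Int) + 1 by push_cast; ring]
  rw [PySem.List.pyRange_one_succ_right (by omega : (1:Int) ≤ (nums.length : Int) + 1)]
  rw [List.foldl_append]
  rw [show List.replicate (nums.length + 1 + 1) (0:Int)
        = List.replicate (nums.length + 1) (0:Int) ++ [0] from List.replicate_succ' ..]
  rw [List.foldl_cons, List.foldl_nil]
  congr 1
  exact afold_pad nums x t1 t2 (PySem.List.pyRange 1 ((nums.length : Int) + 1) 1)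
    (List.replicate (nums.length + 1) 0, List.replicate (nums.length + 1) 0,
     PySem.Dict.empty, (PySem.Dict.empty : PySem.Dict Int Int).insert 0 1, 0)
    (fun i hi => by
      have := (PySem.List.mem_pyRange_one).1 hi
      exact ⟨this.1, by omega⟩)
    (by simp) (by simp)

lemma rel_all (t1 t2 : Int) : ∀ nums : List Int, StateRel nums t1 t2 := by
  intro nums
  induction nums using List.reverseRecOn with
  | nil =>
    simp only [StateRel, AFold, BFold, List.length_nil, Nat.cast_zero, zero_add]
    rw [PySem.List.pyRange_one_eq_nil (by norm_num)]
    simp only [List.foldl_nil]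
    refine ⟨by trivial, by simp, by simp, by simp, ?_, ?_, ?_, ?_⟩
    · simp [PySem.List.pyGetD, PySem.List.pyGet?, PySem.List.pyIdx?]
    · simp [PySem.List.pyGetD, PySem.List.pyGet?, PySem.List.pyIdx?]
    · intro p
      simp [sum1, PySem.Int.mod]
    · intro p
      by_cases hp : p = 0
      · subst hp
        rw [PySem.Dict.getD_insert_self]
        simp [sum2, PySem.Int.mod]
      · rw [PySem.Dict.getD_insert_of_ne _ _ _ hp]
        simp [hp, sum2, PySem.Int.mod]
  | append_singleton nums x ih =>
    simp only [StateRel] at ih ⊢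
    obtain ⟨hpre, hlen, hl1, hl2, ha1, ha2, hmp1, hmp2⟩ := ih
    rw [afold_append, bfold_append]
    simp only [aStep, bStep]
    set A := AFold nums t1 t2
    set B := BFold nums t1 t2
    have hx : PySem.List.pyGetD (nums ++ [x]) ((nums.length : Int) + 1 - 1) 0 = x := by
      rw [show (nums.length : Int) + 1 - 1 = (nums.length : Int) by ring]
      exact pyGetD_concat_length nums x
    have hNL : (nums ++ [x]).length = nums.length + 1 := by simp
    have ht : ((nums.length : Int) + 1).toNat = nums.length + 1 := by omega
    rw [hx]
    simp only [hpre, hNL, ht, hmp1, hmp2, binner_eq]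
    refine ⟨by trivial, by simp [hlen], by simp [hl1], by simp [hl2], ?_, ?_, ?_, ?_⟩
    · rw [pyGetD_set_self _ _ _ (show nums.length + 1 < (A.1 ++ [0]).length by simp [hl1])]
    · rw [pyGetD_set_self _ _ _ (show nums.length + 1 < (A.2.1 ++ [0]).length by simp [hl2])]
      simp
    · intro p
      by_cases hp : p = PySem.Int.bxor B.1 x
      · subst hp
        rw [PySem.Dict.getD_insert_self, mod_add_mod_left, sum1_append]
        simp
      · rw [PySem.Dict.getD_insert_of_ne _ _ _ hp, sum1_append,
           if_neg (show ¬ PySem.Int.bxor B.1 x = p from fun h => hp h.symm), add_zero]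
        exact hmp1 p
    · intro p
      by_cases hp : p = PySem.Int.bxor B.1 x
      · subst hp
        rw [PySem.Dict.getD_insert_self, mod_add_mod_left, sum2_append]
        rw [if_pos rfl]
        rw [add_assoc]
        simp
      · rw [PySem.Dict.getD_insert_of_ne _ _ _ hp, sum2_append,
           if_neg (show ¬ PySem.Int.bxor B.1 x = p from fun h => hp h.symm), add_zero]
        exact hmp2 p

theorem ports_agree (nums : List Int) (t1 t2 : Int) :
    alternatingXOR nums t1 t2 = alternatingXOR_alt nums t1 t2 := by
  have h := rel_all t1 t2 nums
  simp only [StateRel] at h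
  obtain ⟨hpre, hlen, hl1, hl2, ha1, ha2, hmp1, hmp2⟩ := h
  show PySem.Int.mod (PySem.List.pyGetD (AFold nums t1 t2).1 (nums.length : Int) 0
        + PySem.List.pyGetD (AFold nums t1 t2).2.1 (nums.length : Int) 0) 1000000007
      = PySem.Int.mod ((BFold nums t1 t2).2.1 + (BFold nums t1 t2).2.2.1) 1000000007
  rw [ha1, ha2]

-- ===== VERDICT (by name: the statement is the Claim_ definition above) =====
theorem alternatingXOR_spec : Claim_equal_alternatingXOR := by
  intro nums t1 t2 _
  exact ports_agree nums t1 t2
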